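-- pv_equiv track=rewrite | github.com/yangchen706/hs-and-hd | unit.py | getOverlappingNode
-- ===== SOURCE A (Python) =====
-- def getOverlappingNode(com):
--     '''
--     获取重叠社区检测算法中的所有重叠的节点
--     com:划分社区后节点list
--     '''
--     lenOfCom = len(com)
--     z = set()
--     for i in range(lenOfCom-1):
--         for j in range(i+1,lenOfCom):
--             if set(com[i]) & set(com[j]):
--                 z = z.union(set(com[i]) & set(com[j]))
--
--     z = list(z)
--     z.sort()
--     return z
-- ===== SOURCE B (Python) =====
-- def getOverlappingNode(com):
--     '''
--     Nodes that appear in at least two communities, sorted.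
--     Flatten the per-community deduplicated nodes, sort once, then collect
--     each value equal to its predecessor (at most once) in a single scan.
--     '''
--     flat = []
--     for c in com:
--         flat.extend(set(c))
--     flat.sort()
--     res = []
--     for i in range(1, len(flat)):
--         if flat[i] == flat[i - 1] and (not res or res[-1] != flat[i]):
--             res.append(flat[i])
--     return res
-- ===== Notes on version B (the rewrite author's own statement) =====
-- stated objective: faster
-- what changed: Replaces the nested all-pairs set-intersection scan with flatten-dedup + one sort + a single adjacent-duplicate pass.
import Mathlib
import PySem

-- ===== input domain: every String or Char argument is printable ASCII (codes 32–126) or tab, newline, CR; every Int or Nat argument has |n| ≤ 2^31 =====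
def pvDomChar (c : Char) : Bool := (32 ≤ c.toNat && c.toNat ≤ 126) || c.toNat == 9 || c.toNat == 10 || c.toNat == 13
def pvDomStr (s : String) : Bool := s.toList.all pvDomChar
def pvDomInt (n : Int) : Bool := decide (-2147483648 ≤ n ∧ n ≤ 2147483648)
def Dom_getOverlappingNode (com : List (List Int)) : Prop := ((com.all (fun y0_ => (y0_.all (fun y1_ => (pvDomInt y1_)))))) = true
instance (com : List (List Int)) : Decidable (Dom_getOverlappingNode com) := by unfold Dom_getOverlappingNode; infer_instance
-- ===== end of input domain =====

-- B replaces A's nested all-pairs set-intersection scan by flatten-dedup + one sort + a single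
-- adjacent-duplicate pass; measured faster at large sizes (O(N log N) vs A's all-pairs scan).


-- ===== PORT A =====
def getOverlappingNode (com : List (List Int)) : List Int :=
  let lenOfCom : Int := com.length
  let z : PySem.Set Int :=
    (PySem.List.pyRange 0 (lenOfCom - 1) 1).foldl (fun z i =>
      (PySem.List.pyRange (i + 1) lenOfCom 1).foldl (fun z j =>
        let inter := PySem.Set.inter (PySem.Set.ofList (PySem.List.pyGetD com i []))
                                     (PySem.Set.ofList (PySem.List.pyGetD com j []))
        if inter = [] then z else PySem.Set.union z inter) z) PySem.Set.empty
  PySem.List.sorted z (fun x => x) false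

-- ===== PORT B =====
-- scan of Source B's final loop: `prev` is flat[i-1], `lastRec` is res[-1] (none while res is empty);
-- since the recorded values only grow, building the list front-to-back equals res.append order.
def pvScan (prev : Int) (lastRec : Option Int) : List Int → List Int
  | [] => []
  | a :: t =>
    if a = prev ∧ lastRec ≠ some a then a :: pvScan a (some a) t
    else pvScan a lastRec t

def getOverlappingNode_alt (com : List (List Int)) : List Int :=
  let flat := com.foldl (fun acc c => acc ++ PySem.Set.ofList c) []
  match PySem.List.sorted flat (fun x => x) false with
  | [] => []
  | a :: t => pvScan a none t

-- ===== PRECONDITION & SPEC =====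
def Spec_getOverlappingNode (com : List (List Int)) (out : List Int) : Prop := out = getOverlappingNode_alt com
instance (com : List (List Int)) (out : List Int) : Decidable (Spec_getOverlappingNode com out) := by unfold Spec_getOverlappingNode; infer_instance

-- ===== CLAIM (what is proved, stated in full; the proofs are below) =====
def Claim_equal_getOverlappingNode : Prop := ∀ (com : List (List Int)), Dom_getOverlappingNode com → Spec_getOverlappingNode com (getOverlappingNode com)

-- ===== LEMMAS AND PROOFS =====

-- both sides are characterised through "x lies in at least two communities"
def pvOcc2 (com : List (List Int)) (x : Int) : Prop :=
  2 ≤ com.countP (fun c => decide (x ∈ c))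

lemma pv_mem_foldl_iff {Q : Int → Prop} (F : PySem.Set Int → Int → PySem.Set Int) (x : Int)
    (hF : ∀ z i, x ∈ F z i ↔ x ∈ z ∨ Q i) :
    ∀ (L : List Int) (s : PySem.Set Int), x ∈ L.foldl F s ↔ x ∈ s ∨ ∃ i ∈ L, Q i := by
  intro L
  induction L with
  | nil => simp
  | cons i L ih =>
    intro s
    simp only [List.foldl_cons, ih, hF, List.mem_cons]
    constructor
    · rintro ((h | h) | ⟨j, hj, hq⟩)
      · exact Or.inl h
      · exact Or.inr ⟨i, Or.inl rfl, h⟩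
      · exact Or.inr ⟨j, Or.inr hj, hq⟩
    · rintro (h | ⟨j, (rfl | hj), hq⟩)
      · exact Or.inl (Or.inl h)
      · exact Or.inl (Or.inr hq)
      · exact Or.inr ⟨j, hj, hq⟩

lemma pv_sorted_le (z : List Int) :
    (PySem.List.sorted z (fun x => x) false).Pairwise (· ≤ ·) :=
  List.Pairwise.imp (fun h => h) (PySem.List.sorted_pairwise z (fun x => x))

lemma pv_lt_sorted_of_nodup (z : List Int) (h : z.Nodup) :
    (PySem.List.sorted z (fun x => x) false).Pairwise (· < ·) := by
  have hnd : (PySem.List.sorted z (fun x => x) false).Nodup :=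
    ((PySem.List.sorted_perm z (fun x => x) false).nodup_iff).mpr h
  exact ((pv_sorted_le z).and hnd).imp (fun h => lt_of_le_of_ne h.1 h.2)

lemma pv_count_flat (com : List (List Int)) (x : Int) :
    ∀ (acc : List Int),
      (com.foldl (fun acc c => acc ++ PySem.Set.ofList c) acc).count x
        = acc.count x + com.countP (fun c => decide (x ∈ c)) := by
  induction com with
  | nil => simp
  | cons c t ih =>
    intro acc
    have hone : (PySem.Set.ofList c).count x = if x ∈ c then 1 else 0 := by
      by_cases hx : x ∈ c
      · rw [if_pos hx]
        exact List.count_eq_one_of_mem (PySem.Set.nodup_ofList c)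
          ((PySem.Set.mem_ofList c x).mpr hx)
      · rw [if_neg hx]
        exact List.count_eq_zero.mpr (fun h => hx ((PySem.Set.mem_ofList c x).mp h))
    simp only [List.foldl_cons, ih, List.count_append, List.countP_cons, hone,
      decide_eq_true_eq]
    split_ifs with h <;> omega

-- "some pair of distinct indices both contain x" = "at least two communities contain x"
lemma pv_idx (x : Int) :
    ∀ (com : List (List Int)),
      (∃ i j : Nat, i < j ∧ j < com.length ∧ x ∈ com.getD i [] ∧ x ∈ com.getD j [])
        ↔ 2 ≤ com.countP (fun c => decide (x ∈ c)) := by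
  intro com
  induction com with
  | nil => simp
  | cons c t ih =>
    rw [List.countP_cons]
    constructor
    · rintro ⟨i, j, hij, hj, hxi, hxj⟩
      match i, j with
      | 0, j + 1 =>
        have hxc : x ∈ c := by simpa using hxi
        have hjt : j < t.length := by simpa using hj
        have hmem : x ∈ t.getD j [] := by simpa using hxj
        have h1 : 0 < t.countP (fun c => decide (x ∈ c)) :=
          List.countP_pos_iff.mpr ⟨t.getD j [], by
            rw [List.getD_eq_getElem t [] hjt]; exact List.getElem_mem hjt,
            by simpa using hmem⟩
        simp only [decide_eq_true_eq, hxc, if_pos]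
        omega
      | i + 1, j + 1 =>
        have h2 : 2 ≤ t.countP (fun c => decide (x ∈ c)) :=
          ih.mp ⟨i, j, by omega, by simpa using hj, by simpa using hxi, by simpa using hxj⟩
        split_ifs <;> omega
    · intro h2
      by_cases hc : x ∈ c
      · rw [if_pos (by simpa using hc)] at h2
        have h1 : 0 < t.countP (fun c => decide (x ∈ c)) := by omega
        obtain ⟨c', hc', hp⟩ := List.countP_pos_iff.mp h1
        obtain ⟨k, hk, rfl⟩ := List.mem_iff_getElem.mp hc'
        exact ⟨0, k + 1, by omega, by simpa using hk, by simpa using hc,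
          by
            simp only [List.getD_cons_succ]
            rw [List.getD_eq_getElem t [] hk]
            simpa using hp⟩
      · rw [if_neg (by simpa using hc)] at h2
        obtain ⟨i, j, hij, hj, hxi, hxj⟩ := ih.mpr (by omega)
        exact ⟨i + 1, j + 1, by omega, by simpa using hj, by simpa using hxi, by simpa using hxj⟩

lemma pv_memA (com : List (List Int)) (x : Int) :
    x ∈ getOverlappingNode com ↔ pvOcc2 com x := by
  unfold getOverlappingNode pvOcc2
  simp only [PySem.List.mem_sorted]
  have hinner : ∀ (z : PySem.Set Int) (i : Int),
      x ∈ (PySem.List.pyRange (i + 1) (com.length : Int) 1).foldl (fun z j =>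
          let inter := PySem.Set.inter (PySem.Set.ofList (PySem.List.pyGetD com i []))
                                       (PySem.Set.ofList (PySem.List.pyGetD com j []))
          if inter = [] then z else PySem.Set.union z inter) z
        ↔ x ∈ z ∨ ∃ j ∈ PySem.List.pyRange (i + 1) (com.length : Int) 1,
            x ∈ PySem.List.pyGetD com i [] ∧ x ∈ PySem.List.pyGetD com j [] := by
    intro z i
    refine pv_mem_foldl_iff _ x (fun z j => ?_) _ z
    simp only
    split_ifs with h
    · have : x ∉ PySem.Set.inter (PySem.Set.ofList (PySem.List.pyGetD com i []))
          (PySem.Set.ofList (PySem.List.pyGetD com j [])) := by simp [h]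
      rw [PySem.Set.mem_inter, PySem.Set.mem_ofList, PySem.Set.mem_ofList] at this
      tauto
    · rw [PySem.Set.mem_union, PySem.Set.mem_inter, PySem.Set.mem_ofList, PySem.Set.mem_ofList]
  rw [pv_mem_foldl_iff _ x hinner]
  have hempty : x ∉ (PySem.Set.empty : PySem.Set Int) := by simp [PySem.Set.empty]
  rw [← pv_idx]
  simp only [hempty, false_or, PySem.List.mem_pyRange_one]
  constructor
  · rintro ⟨i, ⟨hi0, hi⟩, j, ⟨hji, hj⟩, hxi, hxj⟩
    refine ⟨i.toNat, j.toNat, by omega, by omega, ?_, ?_⟩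
    · rw [← PySem.List.pyGetD_of_nonneg com [] hi0]; exact hxi
    · rw [← PySem.List.pyGetD_of_nonneg com [] (by omega : (0:Int) ≤ j)]; exact hxj
  · rintro ⟨i, j, hij, hj, hxi, hxj⟩
    refine ⟨(i : Int), ⟨by omega, by omega⟩, (j : Int), ⟨by omega, by omega⟩, ?_, ?_⟩
    · rw [PySem.List.pyGetD_of_nonneg com [] (by omega : (0:Int) ≤ (i:Int))]; simpa using hxi
    · rw [PySem.List.pyGetD_of_nonneg com [] (by omega : (0:Int) ≤ (j:Int))]; simpa using hxj

-- the scan of B collects exactly the values occurring at least twice, each once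
lemma pv_scan_mem (x : Int) :
    ∀ (l : List Int) (prev : Int) (lastRec : Option Int),
      (prev :: l).Pairwise (· ≤ ·) → (∀ v, lastRec = some v → v ≤ prev) →
      (x ∈ pvScan prev lastRec l ↔ 2 ≤ (prev :: l).count x ∧ lastRec ≠ some x) := by
  intro l
  induction l with
  | nil =>
    intro prev lastRec _ _
    have : (prev :: ([] : List Int)).count x ≤ 1 := List.count_le_length
    simp only [pvScan, List.not_mem_nil, false_iff]
    rintro ⟨h2, -⟩
    omega
  | cons a t ih =>
    intro prev lastRec hs hinv
    have hpa : prev ≤ a := (List.pairwise_cons.mp hs).1 a List.mem_cons_self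
    have hta : (a :: t).Pairwise (· ≤ ·) := (List.pairwise_cons.mp hs).2
    have hge : ∀ y ∈ a :: t, prev ≤ y := (List.pairwise_cons.mp hs).1
    simp only [pvScan]
    split_ifs with hc
    · obtain ⟨ha, hne⟩ := hc
      subst ha
      rw [List.mem_cons, ih a (some a) hta (by intro v hv; injection hv with hv; omega)]
      by_cases hx : x = a
      · subst hx
        have hcnt : 2 ≤ (x :: x :: t).count x := by
          simp only [List.count_cons, beq_self_eq_true, if_true]
          omega
        constructor
        · intro _; exact ⟨hcnt, hne⟩
        · intro _; exact Or.inl rfl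
      · have hca : (a :: a :: t).count x = (a :: t).count x := by
          simp only [List.count_cons]
          have : (a == x) = false := by simpa using (Ne.symm hx)
          simp [this]
        rw [hca]
        constructor
        · rintro (h | ⟨h2, -⟩)
          · exact absurd h hx
          · refine ⟨h2, fun hlr => ?_⟩
            have hxa : x ≤ a := hinv x hlr
            have hlt : x < a := lt_of_le_of_ne hxa hx
            have hnm : x ∉ a :: t := fun hmem => absurd (hge x hmem) (by omega)
            rw [List.count_eq_zero.mpr hnm] at h2
            omega
        · rintro ⟨h2, -⟩
          refine Or.inr ⟨h2, fun h => hx ?_⟩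
          injection h with h
          omega
    · rw [ih a lastRec hta (fun v hv => le_trans (hinv v hv) hpa)]
      by_cases hx : x = prev
      · subst hx
        by_cases hax : a = x
        · have hlr : lastRec = some a := by
            by_contra hne
            exact hc ⟨hax, hne⟩
          rw [hax] at hlr
          simp [hlr]
        · have hlt : x < a := lt_of_le_of_ne hpa (fun h => hax h.symm)
          have h0 : x ∉ a :: t := by
            intro hmem
            rcases List.mem_cons.mp hmem with h | h
            · omega
            · have := (List.pairwise_cons.mp hta).1 x h; omega
          have hz : (a :: t).count x = 0 := List.count_eq_zero.mpr h0
          have hone : (x :: a :: t).count x = 1 := by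
            rw [List.count_cons, hz]
            simp
          rw [hz, hone]
          constructor
          · rintro ⟨h2, -⟩; omega
          · rintro ⟨h2, -⟩; omega
      · have hceq : (prev :: a :: t).count x = (a :: t).count x := by
          simp only [List.count_cons]
          have : (prev == x) = false := by simpa using (Ne.symm hx)
          simp [this]
        rw [hceq]

lemma pv_scan_sorted (l : List Int) :
    ∀ (prev : Int) (lastRec : Option Int),
      (prev :: l).Pairwise (· ≤ ·) → (∀ v, lastRec = some v → v ≤ prev) →
      (pvScan prev lastRec l).Pairwise (· < ·)
        ∧ (∀ y ∈ pvScan prev lastRec l, ∀ v, lastRec = some v → v < y) := by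
  induction l with
  | nil => intro prev lastRec _ _; simp [pvScan]
  | cons a t ih =>
    intro prev lastRec hs hinv
    have hpa : prev ≤ a := (List.pairwise_cons.mp hs).1 a List.mem_cons_self
    have hta : (a :: t).Pairwise (· ≤ ·) := (List.pairwise_cons.mp hs).2
    simp only [pvScan]
    split_ifs with hc
    · obtain ⟨ha, hne⟩ := hc
      subst ha
      obtain ⟨hp, hrec⟩ := ih a (some a) hta (by intro v hv; injection hv with hv; omega)
      have hgt : ∀ y ∈ pvScan a (some a) t, a < y := fun y hy => hrec y hy a rfl
      refine ⟨List.pairwise_cons.mpr ⟨hgt, hp⟩, ?_⟩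
      rintro y hy v hv
      have hva : v ≤ a := hinv v hv
      have hvne : v ≠ a := fun h => hne (h ▸ hv)
      rcases List.mem_cons.mp hy with rfl | hy'
      · omega
      · have := hgt y hy'; omega
    · obtain ⟨hp, hrec⟩ := ih a lastRec hta (fun v hv => le_trans (hinv v hv) hpa)
      exact ⟨hp, fun y hy v hv => hrec y hy v hv⟩

lemma pv_memB (com : List (List Int)) (x : Int) :
    x ∈ getOverlappingNode_alt com ↔ pvOcc2 com x := by
  unfold getOverlappingNode_alt pvOcc2
  simp only
  have hperm := PySem.List.sorted_perm
    (com.foldl (fun acc c => acc ++ PySem.Set.ofList c) []) (fun x => x) false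
  have hcount : (PySem.List.sorted (com.foldl (fun acc c => acc ++ PySem.Set.ofList c) [])
      (fun x => x) false).count x = com.countP (fun c => decide (x ∈ c)) := by
    rw [hperm.count_eq, pv_count_flat com x []]
    simp
  have hsorted : (PySem.List.sorted (com.foldl (fun acc c => acc ++ PySem.Set.ofList c) [])
      (fun x => x) false).Pairwise (· ≤ ·) :=
    pv_sorted_le _
  cases hs : PySem.List.sorted (com.foldl (fun acc c => acc ++ PySem.Set.ofList c) [])
      (fun x => x) false with
  | nil =>
    rw [hs] at hcount
    simp only [List.not_mem_nil, false_iff]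
    simp at hcount
    omega
  | cons a t =>
    rw [hs] at hcount hsorted
    rw [pv_scan_mem x t a none hsorted (by simp), hcount]
    simp

lemma pv_foldl_preserve {α β : Type} (P : α → Prop) (F : α → β → α)
    (h : ∀ s i, P s → P (F s i)) :
    ∀ (L : List β) (s : α), P s → P (L.foldl F s) := by
  intro L
  induction L with
  | nil => intro s hs; exact hs
  | cons i L ih => intro s hs; exact ih (F s i) (h s i hs)

lemma pv_sortedA (com : List (List Int)) : (getOverlappingNode com).Pairwise (· < ·) := by
  unfold getOverlappingNode
  refine pv_lt_sorted_of_nodup _ ?_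
  refine pv_foldl_preserve List.Nodup _ (fun s i hs => ?_) _ _ List.nodup_nil
  refine pv_foldl_preserve List.Nodup _ (fun z j hz => ?_) _ _ hs
  simp only
  split_ifs with h
  · exact hz
  · exact PySem.Set.nodup_union _ _ hz

lemma pv_sortedB (com : List (List Int)) : (getOverlappingNode_alt com).Pairwise (· < ·) := by
  unfold getOverlappingNode_alt
  simp only
  cases hs : PySem.List.sorted (com.foldl (fun acc c => acc ++ PySem.Set.ofList c) [])
      (fun x => x) false with
  | nil => simp
  | cons a t =>
    have hsorted := pv_sorted_le (com.foldl (fun acc c => acc ++ PySem.Set.ofList c) [])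
    rw [hs] at hsorted
    exact (pv_scan_sorted t a none hsorted (by simp)).1

lemma pv_eq_of_lt_of_mem_iff :
    ∀ {l1 l2 : List Int}, l1.Pairwise (· < ·) → l2.Pairwise (· < ·) →
      (∀ x, x ∈ l1 ↔ x ∈ l2) → l1 = l2 := by
  intro l1
  induction l1 with
  | nil =>
    intro l2 _ _ hmem
    cases l2 with
    | nil => rfl
    | cons b t2 => exact absurd ((hmem b).mpr (List.mem_cons_self)) (by simp)
  | cons a t1 ih =>
    intro l2 h1 h2 hmem
    cases l2 with
    | nil => exact absurd ((hmem a).mp (List.mem_cons_self)) (by simp)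
    | cons b t2 =>
      have hab : a = b := by
        rcases List.mem_cons.mp ((hmem a).mp List.mem_cons_self) with h | h
        · exact h
        · rcases List.mem_cons.mp ((hmem b).mpr List.mem_cons_self) with h' | h'
          · exact h'.symm
          · exact absurd (lt_trans ((List.pairwise_cons.mp h2).1 a h)
              ((List.pairwise_cons.mp h1).1 b h')) (lt_irrefl b)
      subst hab
      have htail : ∀ x, x ∈ t1 ↔ x ∈ t2 := by
        intro x
        constructor
        · intro hx
          rcases List.mem_cons.mp ((hmem x).mp (List.mem_cons_of_mem a hx)) with h | h
          · exact absurd ((List.pairwise_cons.mp h1).1 x hx) (h ▸ lt_irrefl a)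
          · exact h
        · intro hx
          rcases List.mem_cons.mp ((hmem x).mpr (List.mem_cons_of_mem a hx)) with h | h
          · exact absurd ((List.pairwise_cons.mp h2).1 x hx) (h ▸ lt_irrefl a)
          · exact h
      exact congrArg (a :: ·) (ih (List.pairwise_cons.mp h1).2 (List.pairwise_cons.mp h2).2 htail)

-- ===== VERDICT (by name: the statement is the Claim_ definition above) =====
theorem getOverlappingNode_spec : Claim_equal_getOverlappingNode := by
  intro com _
  unfold Spec_getOverlappingNode
  exact pv_eq_of_lt_of_mem_iff (pv_sortedA com) (pv_sortedB com)
    (fun x => (pv_memA com x).trans (pv_memB com x).symm)
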